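-- pv_equiv track=rewrite | github.com/jcolinpatrick/kryptos | scripts/k3_continuity/e_cfm_07_k3_rotational.py | ccw_rotate_perm
-- ===== SOURCE A (Python) =====
-- def ccw_rotate_perm(nrows: int, ncols: int) -> list[int]:
--     """Permutation for 90° counter-clockwise rotation.
--
--     CCW rotation: old[r][c] → new[ncols-1-c][r]
--     New grid is ncols rows × nrows cols.
--     """
--     length = nrows * ncols
--     perm = [0] * length
--     for old_pos in range(length):
--         old_r, old_c = divmod(old_pos, ncols)
--         new_r = ncols - 1 - old_c
--         new_c = old_r
--         new_pos = new_r * nrows + new_c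
--         perm[new_pos] = old_pos
--     return perm
-- ===== SOURCE B (Python) =====
-- def ccw_rotate_perm(nrows: int, ncols: int) -> list[int]:
--     """Permutation for 90° counter-clockwise rotation, built by gathering:
--     for each output index new_pos solve the rotation relation backwards."""
--     return [
--         new_pos % nrows * ncols + (ncols - 1 - new_pos // nrows)
--         for new_pos in range(nrows * ncols)
--     ]
-- ===== Notes on version B (the rewrite author's own statement) =====
-- stated objective: simpler
-- what changed: B fills the permutation in output order by inverting the rotation map (a single gather comprehension old_pos = new_pos%nrows*ncols + (ncols-1-new_pos//nrows)) instead of allocating a zero list and scattering each source index into its computed destination slot.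
import Mathlib
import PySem

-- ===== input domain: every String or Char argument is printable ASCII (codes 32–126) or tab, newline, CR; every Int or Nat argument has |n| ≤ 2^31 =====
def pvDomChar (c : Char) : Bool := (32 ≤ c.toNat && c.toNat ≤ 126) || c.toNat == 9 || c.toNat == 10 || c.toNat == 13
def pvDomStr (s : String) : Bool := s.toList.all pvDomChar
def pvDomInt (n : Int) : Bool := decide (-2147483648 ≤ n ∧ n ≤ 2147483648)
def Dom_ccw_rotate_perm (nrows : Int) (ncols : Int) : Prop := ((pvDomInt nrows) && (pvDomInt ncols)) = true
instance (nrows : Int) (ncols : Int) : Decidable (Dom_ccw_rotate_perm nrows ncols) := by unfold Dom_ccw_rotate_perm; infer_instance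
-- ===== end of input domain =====

-- B builds the permutation in output order by inverting the rotation map (a gather)
-- instead of scattering source indices into computed destinations: simpler, same cost.

-- ===== PORT A =====
def ccw_rotate_perm (nrows : Int) (ncols : Int) : List Int :=
  let length := nrows * ncols
  let perm : List Int := List.replicate length.toNat 0  -- [0] * length ([] when length < 0)
  -- perm[new_pos] = old_pos: pySetD is exact here — under Pre_ every write index is in range
  (PySem.List.pyRange 0 length 1).foldl
    (fun perm old_pos =>
      let old_r := PySem.Int.floordiv old_pos ncols
      let old_c := PySem.Int.mod old_pos ncols
      let new_r := ncols - 1 - old_c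
      let new_c := old_r
      let new_pos := new_r * nrows + new_c
      PySem.List.pySetD perm new_pos old_pos) perm

-- ===== PORT B =====
def ccw_rotate_perm_alt (nrows : Int) (ncols : Int) : List Int :=
  (PySem.List.pyRange 0 (nrows * ncols) 1).map
    (fun new_pos =>
      PySem.Int.mod new_pos nrows * ncols + (ncols - 1 - PySem.Int.floordiv new_pos nrows))

-- ===== PRECONDITION & SPEC =====
-- Pre_ excludes nrows < 0 ∧ ncols < 0, on which Python A raises IndexError at the first write
-- (the first destination index is (ncols-1)*nrows ≥ the list length).
def Pre_ccw_rotate_perm (nrows : Int) (ncols : Int) : Prop := 0 ≤ nrows ∨ 0 ≤ ncols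
instance (nrows : Int) (ncols : Int) : Decidable (Pre_ccw_rotate_perm nrows ncols) := by
  unfold Pre_ccw_rotate_perm; infer_instance
def pvWitness_ccw_rotate_perm : Int × Int := (2, 3)

def Spec_ccw_rotate_perm (nrows : Int) (ncols : Int) (out : List Int) : Prop := out = ccw_rotate_perm_alt nrows ncols
instance (nrows : Int) (ncols : Int) (out : List Int) : Decidable (Spec_ccw_rotate_perm nrows ncols out) := by unfold Spec_ccw_rotate_perm; infer_instance

-- ===== CLAIM (what is proved, stated in full; the proofs are below) =====
def Claim_equal_ccw_rotate_perm : Prop := ∀ (nrows : Int) (ncols : Int), Dom_ccw_rotate_perm nrows ncols → Pre_ccw_rotate_perm nrows ncols → Spec_ccw_rotate_perm nrows ncols (ccw_rotate_perm nrows ncols)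

-- ===== LEMMAS AND PROOFS =====

-- destination slot A writes source index x to (forward rotation map), in Nat
def pvScatter (R C : Nat) (x : Nat) : Nat := (C - 1 - x % C) * R + x / C
-- source index B reads output slot i from (inverse rotation map), in Nat
def pvGather (R C : Nat) (i : Nat) : Nat := (i % R) * C + (C - 1 - i / R)

lemma pv_gather_lt (R C : Nat) (hR : 0 < R) (hC : 0 < C) (i : Nat) (_hi : i < R * C) :
    pvGather R C i < R * C := by
  unfold pvGather
  have h1 : i % R < R := Nat.mod_lt _ hR
  have hA : (i % R + 1) * C ≤ R * C := Nat.mul_le_mul_right C (by omega)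
  have h2 : C - 1 - i / R < C := Nat.lt_of_le_of_lt (Nat.sub_le _ _) (by omega)
  nlinarith

lemma pv_gather_scatter (R C : Nat) (hR : 0 < R) (hC : 0 < C) (x : Nat) (hx : x < R * C) :
    pvGather R C (pvScatter R C x) = x := by
  unfold pvGather pvScatter
  have hb : x / C < R := (Nat.div_lt_iff_lt_mul hC).mpr hx
  have ha : x % C < C := Nat.mod_lt _ hC
  have hmod : ((C - 1 - x % C) * R + x / C) % R = x / C := by
    rw [Nat.mul_comm (C - 1 - x % C) R, Nat.mul_add_mod]; exact Nat.mod_eq_of_lt hb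
  have hdiv : ((C - 1 - x % C) * R + x / C) / R = C - 1 - x % C := by
    rw [Nat.mul_comm (C - 1 - x % C) R, Nat.mul_add_div hR, Nat.div_eq_of_lt hb, Nat.add_zero]
  rw [hmod, hdiv]
  have h3 : C - 1 - (C - 1 - x % C) = x % C := by omega
  rw [h3]
  have h4 := Nat.div_add_mod x C
  linarith

lemma pv_scatter_gather (R C : Nat) (hR : 0 < R) (hC : 0 < C) (i : Nat) (hi : i < R * C) :
    pvScatter R C (pvGather R C i) = i := by
  unfold pvGather pvScatter
  have hb : i / R < C := (Nat.div_lt_iff_lt_mul hR).mpr (by rw [Nat.mul_comm]; exact hi)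
  have ha : C - 1 - i / R < C := Nat.lt_of_le_of_lt (Nat.sub_le _ _) (by omega)
  have hmod : ((i % R) * C + (C - 1 - i / R)) % C = C - 1 - i / R := by
    rw [Nat.mul_comm (i % R) C, Nat.mul_add_mod]; exact Nat.mod_eq_of_lt ha
  have hdiv : ((i % R) * C + (C - 1 - i / R)) / C = i % R := by
    rw [Nat.mul_comm (i % R) C, Nat.mul_add_div hC, Nat.div_eq_of_lt ha, Nat.add_zero]
  rw [hmod, hdiv]
  have h3 : C - 1 - (C - 1 - i / R) = i / R := by omega
  rw [h3]
  have h4 := Nat.div_add_mod i R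
  linarith

-- after processing source indices 0..k-1, slot i holds its gathered source iff it was already written
lemma pv_scatter_fold (R C : Nat) (hR : 0 < R) (hC : 0 < C) :
    ∀ k, k ≤ R * C →
    (List.range k).foldl (fun l x => l.set (pvScatter R C x) (x : Int)) (List.replicate (R * C) (0 : Int))
      = (List.range (R * C)).map (fun i => if pvGather R C i < k then ((pvGather R C i : Nat) : Int) else 0)
  | 0, _ => by
    simp [List.map_const']
  | (k + 1), hk => by
    rw [List.range_succ, List.foldl_append, pv_scatter_fold R C hR hC k (by omega)]
    simp only [List.foldl_cons, List.foldl_nil]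
    apply List.ext_getElem
    · simp
    intro i h1 h2
    have hiRC : i < R * C := by simpa using h2
    rw [List.getElem_set]
    simp only [List.getElem_map, List.getElem_range]
    by_cases he : pvScatter R C k = i
    · have hg : pvGather R C i = k := by
        rw [← he]; exact pv_gather_scatter R C hR hC k (by omega)
      simp [he, hg]
    · simp only [if_neg he]
      have hne : pvGather R C i ≠ k := by
        intro h
        apply he
        rw [← h]; exact pv_scatter_gather R C hR hC i hiRC
      by_cases hlt : pvGather R C i < k
      · rw [if_pos hlt, if_pos (by omega)]
      · rw [if_neg hlt, if_neg (by omega)]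

lemma pvA_nonpos (nrows ncols : Int) (hn : nrows * ncols ≤ 0) : ccw_rotate_perm nrows ncols = [] := by
  unfold ccw_rotate_perm
  simp [PySem.List.pyRange_one, Int.toNat_of_nonpos hn]

lemma pvB_nonpos (nrows ncols : Int) (hn : nrows * ncols ≤ 0) : ccw_rotate_perm_alt nrows ncols = [] := by
  unfold ccw_rotate_perm_alt
  simp [PySem.List.pyRange_one, Int.toNat_of_nonpos hn]

lemma pvA_pos (R C : Nat) (_hR : 0 < R) (hC : 0 < C) :
    ccw_rotate_perm (R : Int) (C : Int)
      = (List.range (R * C)).foldl (fun l x => l.set (pvScatter R C x) (x : Int)) (List.replicate (R * C) (0 : Int)) := by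
  unfold ccw_rotate_perm
  have hcast : (R : Int) * (C : Int) = ((R * C : Nat) : Int) := by push_cast; ring
  simp only [hcast, PySem.List.pyRange_zero_natCast, List.foldl_map, Int.toNat_natCast]
  congr 1
  funext l x
  simp only [PySem.Int.floordiv_natCast, PySem.Int.mod_natCast]
  have hidx : ((C : Int) - 1 - ((x % C : Nat) : Int)) * (R : Int) + ((x / C : Nat) : Int)
      = ((pvScatter R C x : Nat) : Int) := by
    unfold pvScatter
    have h1 : x % C < C := Nat.mod_lt _ hC
    push_cast [Nat.cast_sub (by omega : x % C ≤ C - 1), Nat.cast_sub (by omega : 1 ≤ C)]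
    ring
  rw [hidx, PySem.List.pySetD_natCast]

lemma pvB_pos (R C : Nat) (hR : 0 < R) (hC : 0 < C) :
    ccw_rotate_perm_alt (R : Int) (C : Int)
      = (List.range (R * C)).map (fun i => ((pvGather R C i : Nat) : Int)) := by
  unfold ccw_rotate_perm_alt
  have hcast : (R : Int) * (C : Int) = ((R * C : Nat) : Int) := by push_cast; ring
  rw [hcast, PySem.List.pyRange_zero_natCast, List.map_map]
  apply List.map_congr_left
  intro i hi
  have hiRC : i < R * C := List.mem_range.mp hi
  have hb : i / R < C := (Nat.div_lt_iff_lt_mul hR).mpr (by rw [Nat.mul_comm]; exact hiRC)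
  simp only [Function.comp_apply, PySem.Int.floordiv_natCast, PySem.Int.mod_natCast]
  unfold pvGather
  push_cast [Nat.cast_sub (by omega : i / R ≤ C - 1), Nat.cast_sub (by omega : 1 ≤ C)]
  ring

-- ===== VERDICT (by name: the statement is the Claim_ definition above) =====
theorem ccw_rotate_perm_spec : Claim_equal_ccw_rotate_perm := by
  intro nrows ncols _ hpre
  unfold Spec_ccw_rotate_perm
  by_cases hn : nrows * ncols ≤ 0
  · rw [pvA_nonpos nrows ncols hn, pvB_nonpos nrows ncols hn]
  · have hprod : 0 < nrows * ncols := by omega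
    have hrc : 0 < nrows ∧ 0 < ncols := by
      rcases mul_pos_iff.mp hprod with h | h
      · exact h
      · rcases hpre with h' | h' <;> omega
    obtain ⟨hr, hc⟩ := hrc
    lift nrows to ℕ using hr.le with R
    lift ncols to ℕ using hc.le with C
    have hR : 0 < R := by exact_mod_cast hr
    have hC : 0 < C := by exact_mod_cast hc
    rw [pvA_pos R C hR hC, pvB_pos R C hR hC, pv_scatter_fold R C hR hC (R * C) le_rfl]
    exact List.map_congr_left (fun i hi => by
      have h := pv_gather_lt R C hR hC i (List.mem_range.mp hi)
      simp [h])
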